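-- pv_equiv track=rewrite | github.com/shumanhi/nullion | src/nullion/chat_response_contract.py | _is_ungrounded_operational_narration
-- ===== SOURCE A (Python) =====
-- _UNGROUNDED_OPERATIONAL_NARRATION_PHRASES = (
--     "i need permission",
--     "resend the message",
--     "try again",
--     "fetch web content first",
--     "runtime state",
--     "permission to fetch",
--     "webfetch",
-- )
--
-- def _tokenize_text(text: str) -> list[str]:
--     normalized_chars = [char if (char.isalnum() or char in {"_", "'"}) else " " for char in text.casefold().replace("’", "'")]
--     return "".join(normalized_chars).split()
--
-- def _normalized_lower_text(text: str) -> str: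
--     return " ".join(_tokenize_text(text))
--
-- def _text_has_any_phrase(text: str, phrases: tuple[str, ...]) -> bool:
--     normalized = _normalized_lower_text(text)
--     padded = f" {normalized} "
--     return any(f" {phrase} " in padded for phrase in phrases)
--
-- def _is_ungrounded_operational_narration(text: str) -> bool:
--     if _text_has_any_phrase(text, _UNGROUNDED_OPERATIONAL_NARRATION_PHRASES):
--         return True
--     tokens = _tokenize_text(text)
--     for index, token in enumerate(tokens):
--         if token != "approve":
--             continue
--         next_tokens = tokens[index + 1 : index + 5]
--         if "tool" in next_tokens:
--             return True
--     return False
-- ===== SOURCE B (Python) =====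
-- _PHRASE_TOKEN_SEQS = (
--     ("i", "need", "permission"),
--     ("resend", "the", "message"),
--     ("try", "again"),
--     ("fetch", "web", "content", "first"),
--     ("runtime", "state"),
--     ("permission", "to", "fetch"),
--     ("webfetch",),
-- )
--
--
-- def _is_ungrounded_operational_narration(text: str) -> bool:
--     # One-pass tokenizer: group maximal runs of word characters.
--     tokens = []
--     current = []
--     for ch in text.casefold():
--         if ch == "\u2019":
--             ch = "'"
--         if ch.isalnum() or ch == "_" or ch == "'":
--             current.append(ch)
--         elif current:
--             tokens.append("".join(current))
--             current = []
--     if current: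
--         tokens.append("".join(current))
--     # Single scan with direct n-gram matching over tokens.
--     n = len(tokens)
--     for i in range(n):
--         for seq in _PHRASE_TOKEN_SEQS:
--             if tuple(tokens[i:i + len(seq)]) == seq:
--                 return True
--         if tokens[i] == "approve" and "tool" in tokens[i + 1:i + 5]:
--             return True
--     return False
-- ===== Notes on version B (the rewrite author's own statement) =====
-- stated objective: alternative
-- what changed: Replaces the rejoin-then-padded-substring-search over seven phrase strings with a one-pass run-grouping tokenizer plus a single scan that matches each phrase as a contiguous token n-gram (and checks the approve/tool window at the same index).
import Mathlib
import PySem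

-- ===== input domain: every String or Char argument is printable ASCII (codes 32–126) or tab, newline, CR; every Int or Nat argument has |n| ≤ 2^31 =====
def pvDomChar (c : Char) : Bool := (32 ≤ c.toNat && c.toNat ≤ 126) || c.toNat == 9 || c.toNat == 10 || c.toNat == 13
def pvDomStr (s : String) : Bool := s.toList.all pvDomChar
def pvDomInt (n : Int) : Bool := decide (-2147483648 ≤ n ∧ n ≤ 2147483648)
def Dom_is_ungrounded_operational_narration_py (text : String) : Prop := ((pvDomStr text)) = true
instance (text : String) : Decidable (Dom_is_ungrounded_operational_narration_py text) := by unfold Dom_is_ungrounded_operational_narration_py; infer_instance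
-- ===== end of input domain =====

-- B re-implements the phrase detector as a one-pass run-grouping tokenizer plus direct token n-gram
-- matching, instead of A's rejoin-and-padded-substring search; alternative structure, no speed claim.

-- ===== PORT A =====
-- _UNGROUNDED_OPERATIONAL_NARRATION_PHRASES
def pvPhrasesA : List String :=
  ["i need permission", "resend the message", "try again", "fetch web content first",
   "runtime state", "permission to fetch", "webfetch"]

-- _tokenize_text; tokens kept as List Char (Python str). text.casefold() is ported as
-- PySem.Chars.lower, exact on the printable-ASCII domain; the replace of '’' is ported literally.
def pvTokenizeA (text : String) : List (List Char) :=
  let base := PySem.Chars.replace (PySem.Chars.lower text.toList) ['’'] ['\'']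
  let normalized := base.map (fun c => if PySem.Chars.isalnum c || c == '_' || c == '\'' then c else ' ')
  PySem.Chars.split₀ normalized

-- _normalized_lower_text
def pvNormalizedLowerA (text : String) : List Char :=
  PySem.Chars.join [' '] (pvTokenizeA text)

-- _text_has_any_phrase
def pvHasAnyPhraseA (text : String) (phrases : List String) : Bool :=
  let padded := ' ' :: pvNormalizedLowerA text ++ [' ']
  phrases.any (fun p => PySem.Chars.isIn (' ' :: p.toList ++ [' ']) padded)

def is_ungrounded_operational_narration_py (text : String) : Bool :=
  if pvHasAnyPhraseA text pvPhrasesA then true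
  else
    let tokens := pvTokenizeA text
    (PySem.List.enumerate tokens).any (fun it =>
      it.2 == "approve".toList &&
      (PySem.List.slice tokens (some (it.1 + 1)) (some (it.1 + 5))).contains "tool".toList)

-- ===== PORT B =====
-- _PHRASE_TOKEN_SEQS
def pvSeqsB : List (List (List Char)) :=
  [["i".toList, "need".toList, "permission".toList],
   ["resend".toList, "the".toList, "message".toList],
   ["try".toList, "again".toList],
   ["fetch".toList, "web".toList, "content".toList, "first".toList],
   ["runtime".toList, "state".toList],
   ["permission".toList, "to".toList, "fetch".toList],
   ["webfetch".toList]]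

-- the body of Source B's per-character loop (state = (tokens, current))
def pvStepB (st : List (List Char) × List Char) (c : Char) : List (List Char) × List Char :=
  let c := if c == '’' then '\'' else c
  if PySem.Chars.isalnum c || c == '_' || c == '\'' then (st.1, st.2 ++ [c])
  else if st.2.isEmpty then st else (st.1 ++ [st.2], [])

-- Source B's one-pass tokenizer (text.casefold() ported as PySem.Chars.lower, exact on the ASCII domain)
def pvTokenizeB (text : String) : List (List Char) :=
  let st := (PySem.Chars.lower text.toList).foldl pvStepB ([], [])
  if st.2.isEmpty then st.1 else st.1 ++ [st.2]

-- single scan: for i in range(n): n-gram phrase match at i, or the approve/tool window at i.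
-- tokens[i] is ported as pyGetD with default [] (i ∈ range(n) is always in bounds).
def is_ungrounded_operational_narration_py_alt (text : String) : Bool :=
  let tokens := pvTokenizeB text
  let n : Int := PySem.List.len tokens
  (PySem.List.pyRange 0 n).any (fun i =>
    pvSeqsB.any (fun seq =>
      PySem.List.slice tokens (some i) (some (i + PySem.List.len seq)) == seq) ||
    (PySem.List.pyGetD tokens i [] == "approve".toList &&
     (PySem.List.slice tokens (some (i + 1)) (some (i + 5))).contains "tool".toList))

-- ===== PRECONDITION & SPEC =====
def Spec_is_ungrounded_operational_narration_py (text : String) (out : Bool) : Prop := out = is_ungrounded_operational_narration_py_alt text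
instance (text : String) (out : Bool) : Decidable (Spec_is_ungrounded_operational_narration_py text out) := by unfold Spec_is_ungrounded_operational_narration_py; infer_instance

-- ===== CLAIM (what is proved, stated in full; the proofs are below) =====
def Claim_equal_is_ungrounded_operational_narration_py : Prop := ∀ (text : String), Dom_is_ungrounded_operational_narration_py text → Spec_is_ungrounded_operational_narration_py text (is_ungrounded_operational_narration_py text)

-- ===== LEMMAS AND PROOFS =====

-- a good token: nonempty and space-free
def pvGoodW (t : List Char) : Prop := t ≠ [] ∧ ∀ c ∈ t, c ≠ ' '

-- " " + " ".join(ts) + " " for nonempty ts, in flatMap form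
def pvQ (ts : List (List Char)) : List Char := ts.flatMap (fun t => ' ' :: t) ++ [' ']

theorem pvQ_nil : pvQ [] = [' '] := rfl

theorem pvQ_cons (t : List Char) (ts : List (List Char)) :
    pvQ (t :: ts) = ' ' :: (t ++ pvQ ts) := by
  simp [pvQ]

theorem pvQ_head (ts : List (List Char)) : ∃ r, pvQ ts = ' ' :: r := by
  cases ts with
  | nil => exact ⟨[], rfl⟩
  | cons t ts => exact ⟨t ++ pvQ ts, pvQ_cons t ts⟩

theorem pvQ_len3 (u : List Char) (us : List (List Char)) (hu : u ≠ []) :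
    3 ≤ (pvQ (u :: us)).length := by
  obtain ⟨r, hr⟩ := pvQ_head us
  rw [pvQ_cons, hr]
  cases u with
  | nil => exact absurd rfl hu
  | cons a u' => simp; omega

-- word-boundary comparison: space-free words followed by space-headed tails
theorem pv_word_prefix (u : List Char) (v p q : List Char)
    (hu : ∀ c ∈ u, c ≠ ' ') (hv : ∀ c ∈ v, c ≠ ' ')
    (hp : ∃ p', p = ' ' :: p') (hq : ∃ q', q = ' ' :: q') :
    (u ++ p <+: v ++ q) ↔ (u = v ∧ p <+: q) := by
  induction u generalizing v with
  | nil =>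
    cases v with
    | nil => simp
    | cons c v' =>
      obtain ⟨p', rfl⟩ := hp
      simp only [List.nil_append, List.cons_append, List.cons_prefix_cons]
      constructor
      · rintro ⟨rfl, -⟩
        exact absurd rfl (hv _ (by simp))
      · rintro ⟨h, -⟩
        exact absurd h.symm (List.cons_ne_nil _ _)
  | cons a u' ih =>
    cases v with
    | nil =>
      obtain ⟨q', rfl⟩ := hq
      simp only [List.cons_append, List.nil_append, List.cons_prefix_cons]
      constructor
      · rintro ⟨rfl, -⟩
        exact absurd rfl (hu _ (by simp))
      · rintro ⟨h, -⟩
        exact absurd h (List.cons_ne_nil _ _)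
    | cons c v' =>
      simp only [List.cons_append, List.cons_prefix_cons]
      rw [ih v' (fun x hx => hu x (List.mem_cons_of_mem _ hx)) (fun x hx => hv x (List.mem_cons_of_mem _ hx))]
      constructor
      · rintro ⟨rfl, rfl, h⟩; exact ⟨rfl, h⟩
      · rintro ⟨h, h2⟩
        injection h with e1 e2
        subst e1; subst e2
        exact ⟨rfl, rfl, h2⟩

theorem pv_q_prefix (us vs : List (List Char))
    (hus : ∀ u ∈ us, pvGoodW u) (hvs : ∀ v ∈ vs, pvGoodW v) :
    (pvQ us <+: pvQ vs) ↔ us <+: vs := by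
  induction us generalizing vs with
  | nil =>
    obtain ⟨r, hr⟩ := pvQ_head vs
    simp [pvQ_nil, hr, List.cons_prefix_cons]
  | cons u us' ih =>
    cases vs with
    | nil =>
      constructor
      · intro h
        have := h.length_le
        have h3 := pvQ_len3 u us' (hus u (by simp)).1
        simp [pvQ_nil] at this
        omega
      · intro h
        exact absurd h (by simp)
    | cons v vs' =>
      rw [pvQ_cons, pvQ_cons, List.cons_prefix_cons]
      have hu : ∀ c ∈ u, c ≠ ' ' := (hus u (by simp)).2
      have hv : ∀ c ∈ v, c ≠ ' ' := (hvs v (by simp)).2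
      rw [pv_word_prefix u v _ _ hu hv (pvQ_head us') (pvQ_head vs'),
          ih vs' (fun x hx => hus x (List.mem_cons_of_mem _ hx)) (fun x hx => hvs x (List.mem_cons_of_mem _ hx))]
      simp [List.cons_prefix_cons]

theorem pv_skip_word (v r p : List Char) (hv : ∀ c ∈ v, c ≠ ' ')
    (hp : ∃ p', p = ' ' :: p') (h : p <:+: v ++ r) : p <:+: r := by
  induction v with
  | nil => simpa using h
  | cons c v' ih =>
    rw [List.cons_append] at h
    rcases List.infix_cons_iff.mp h with hpre | hinf
    · obtain ⟨p', rfl⟩ := hp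
      rw [List.cons_prefix_cons] at hpre
      exact absurd hpre.1.symm (hv c (by simp))
    · exact ih (fun x hx => hv x (List.mem_cons_of_mem _ hx)) hinf

theorem pv_q_infix_of (us vs : List (List Char)) (h : us <:+: vs) : pvQ us <:+: pvQ vs := by
  obtain ⟨a, b, rfl⟩ := h
  obtain ⟨rb, hrb⟩ := pvQ_head b
  refine ⟨a.flatMap (fun t => ' ' :: t), rb, ?_⟩
  have : pvQ (a ++ us ++ b) = a.flatMap (fun t => ' ' :: t) ++ us.flatMap (fun t => ' ' :: t) ++ (b.flatMap (fun t => ' ' :: t) ++ [' ']) := by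
    simp [pvQ, List.flatMap_append]
  rw [this]
  have hb : b.flatMap (fun t => ' ' :: t) ++ [' '] = ' ' :: rb := hrb ▸ rfl
  rw [hb]
  simp [pvQ]

theorem pv_q_infix_to (vs us : List (List Char))
    (hus : ∀ u ∈ us, pvGoodW u) (hvs : ∀ v ∈ vs, pvGoodW v)
    (h : pvQ us <:+: pvQ vs) : us <:+: vs := by
  induction vs with
  | nil =>
    cases us with
    | nil => exact List.nil_infix
    | cons u us' =>
      have h3 := pvQ_len3 u us' (hus u (by simp)).1
      have := h.length_le
      simp [pvQ_nil] at this
      omega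
  | cons v vs' ih =>
    rw [pvQ_cons] at h
    rcases List.infix_cons_iff.mp h with hpre | hinf
    · rw [← pvQ_cons] at hpre
      exact ((pv_q_prefix us (v :: vs') hus hvs).mp hpre).isInfix
    · have hv : ∀ c ∈ v, c ≠ ' ' := (hvs v (by simp)).2
      have h' := pv_skip_word v (pvQ vs') (pvQ us) hv (pvQ_head us) hinf
      exact List.infix_cons (ih (fun x hx => hvs x (List.mem_cons_of_mem _ hx)) h')

theorem pv_q_infix_iff (us vs : List (List Char))
    (hus : ∀ u ∈ us, pvGoodW u) (hvs : ∀ v ∈ vs, pvGoodW v) :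
    (pvQ us <:+: pvQ vs) ↔ us <:+: vs :=
  ⟨pv_q_infix_to vs us hus hvs, pv_q_infix_of us vs⟩

-- " " + " ".join(toks) + " " equals pvQ toks for nonempty toks
theorem pv_pad_eq (toks : List (List Char)) (h : toks ≠ []) :
    (' ' :: PySem.Chars.join [' '] toks ++ [' ']) = pvQ toks := by
  induction toks with
  | nil => exact absurd rfl h
  | cons t ts ih =>
    cases ts with
    | nil => simp [PySem.Chars.join, pvQ, List.intercalate]
    | cons t' ts' =>
      have h2 : PySem.Chars.join [' '] (t :: t' :: ts') = t ++ ' ' :: PySem.Chars.join [' '] (t' :: ts') := by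
        simp [PySem.Chars.join, List.intercalate, List.intersperse]
      rw [h2, pvQ_cons, ← ih (by simp)]
      simp

-- every token produced by split₀ is nonempty and free of isspace characters
theorem pv_split₀_go_good (l : List Char) : ∀ (cur : List Char) (acc : List (List Char)),
    (∀ c ∈ cur, PySem.Chars.isspace c = false) →
    (∀ t ∈ acc, t ≠ [] ∧ ∀ c ∈ t, PySem.Chars.isspace c = false) →
    ∀ t ∈ PySem.Chars.split₀.go l cur acc, t ≠ [] ∧ ∀ c ∈ t, PySem.Chars.isspace c = false := by
  induction l with
  | nil =>
    intro cur acc hcur hacc t ht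
    simp only [PySem.Chars.split₀.go] at ht
    split at ht
    · exact hacc t (by simpa using ht)
    · rw [List.mem_reverse, List.mem_cons] at ht
      rcases ht with rfl | ht
      · refine ⟨by simpa [List.isEmpty_iff] using ‹¬cur.isEmpty = true›, ?_⟩
        intro c hc; exact hcur c (List.mem_reverse.mp hc)
      · exact hacc t ht
  | cons c rest ih =>
    intro cur acc hcur hacc t ht
    simp only [PySem.Chars.split₀.go] at ht
    split at ht
    · split at ht
      · exact ih [] acc (by simp) hacc t ht
      · refine ih [] (cur.reverse :: acc) (by simp) ?_ t ht
        intro t' ht'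
        rcases List.mem_cons.mp ht' with rfl | ht'
        · refine ⟨by simpa [List.isEmpty_iff] using ‹¬cur.isEmpty = true›, ?_⟩
          intro c' hc'; exact hcur c' (List.mem_reverse.mp hc')
        · exact hacc t' ht'
    · rename_i hns
      refine ih (c :: cur) acc ?_ hacc t ht
      intro c' hc'
      rcases List.mem_cons.mp hc' with rfl | hc'
      · simpa using hns
      · exact hcur c' hc'

theorem pv_split₀_good (l : List Char) : ∀ t ∈ PySem.Chars.split₀ l, pvGoodW t := by
  intro t ht
  have h := pv_split₀_go_good l [] [] (by simp) (by simp) t ht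
  refine ⟨h.1, fun c hc => ?_⟩
  intro hcsp
  have := h.2 c hc
  rw [hcsp] at this
  exact absurd this (by decide)

-- word characters are not whitespace
theorem pv_word_not_space (c : Char)
    (h : (PySem.Chars.isalnum c || c == '_' || c == '\'') = true) :
    PySem.Chars.isspace c = false := by
  simp only [PySem.Chars.isalnum, PySem.Chars.isalpha, PySem.Chars.isdigit,
    PySem.Chars.isupper, PySem.Chars.islower, Bool.or_eq_true, Bool.and_eq_true,
    decide_eq_true_eq, beq_iff_eq] at h
  have hn : (39 ≤ c.toNat ∧ c.toNat ≤ 39) ∨ (48 ≤ c.toNat ∧ c.toNat ≤ 57) ∨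
      (65 ≤ c.toNat ∧ c.toNat ≤ 90) ∨ (95 ≤ c.toNat ∧ c.toNat ≤ 95) ∨
      (97 ≤ c.toNat ∧ c.toNat ≤ 122) := by
    rcases h with (((⟨h1, h2⟩ | ⟨h1, h2⟩) | ⟨h1, h2⟩) | rfl) | rfl
    · exact Or.inr (Or.inr (Or.inl ⟨h1, h2⟩))
    · exact Or.inr (Or.inr (Or.inr (Or.inr ⟨h1, h2⟩)))
    · exact Or.inr (Or.inl ⟨h1, h2⟩)
    · exact Or.inr (Or.inr (Or.inr (Or.inl (by constructor <;> decide))))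
    · exact Or.inl (by constructor <;> decide)
  simp only [PySem.Chars.isspace, Bool.or_eq_false_iff, Bool.and_eq_false_iff,
    decide_eq_false_iff_not]
  omega

-- replace with a pattern absent from the string is the identity
theorem pv_replace_go (fuel : ℕ) : ∀ (l acc : List Char), '’' ∉ l →
    PySem.Chars.replace.go ['’'] ['\''] fuel l acc = acc.reverse ++ l := by
  induction fuel with
  | zero => intro l acc _; simp [PySem.Chars.replace.go]
  | succ fuel ih =>
    intro l acc h
    cases l with
    | nil => simp [PySem.Chars.replace.go]
    | cons c t =>
      have hc : c ≠ '’' := fun hcc => h (by simp [hcc])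
      have hpre : List.isPrefixOf ['’'] (c :: t) = false := by
        simp [List.isPrefixOf]
        exact fun hcc => absurd hcc.symm hc
      simp only [PySem.Chars.replace.go, hpre]
      rw [ih t (c :: acc) (fun ht => h (by simp [ht]))]
      simp

theorem pv_replace_eq (s : List Char) (h : '’' ∉ s) :
    PySem.Chars.replace s ['’'] ['\''] = s := by
  simp only [PySem.Chars.replace, List.isEmpty_cons, Bool.false_eq_true, if_false]
  simpa using pv_replace_go s.length s [] h

-- the lowercased Dom string never contains '’'
theorem pv_no_quote (text : String) (hd : Dom_is_ungrounded_operational_narration_py text) :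
    '’' ∉ PySem.Chars.lower text.toList := by
  unfold Dom_is_ungrounded_operational_narration_py pvDomStr at hd
  intro hmem
  simp only [PySem.Chars.lower, List.mem_map] at hmem
  obtain ⟨c, hc, hlc⟩ := hmem
  have hdc : pvDomChar c = true := List.all_eq_true.mp hd c hc
  have hle : c.toNat ≤ 126 := by
    simp only [pvDomChar, Bool.or_eq_true, Bool.and_eq_true, decide_eq_true_eq, beq_iff_eq] at hdc
    omega
  have h8 : ('’' : Char).toNat = 8217 := by decide
  have hT := congrArg Char.toNat hlc
  rw [h8] at hT
  unfold PySem.Chars.lowerChar at hT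
  split at hT
  · rw [Char.toNat_ofNat] at hT
    split at hT <;> omega
  · omega

-- split₀.go's accumulator prepends
theorem pv_go_acc (l : List Char) : ∀ (cur : List Char) (acc : List (List Char)),
    PySem.Chars.split₀.go l cur acc = acc.reverse ++ PySem.Chars.split₀.go l cur [] := by
  induction l with
  | nil =>
    intro cur acc
    simp only [PySem.Chars.split₀.go]
    split <;> simp
  | cons c rest ih =>
    intro cur acc
    simp only [PySem.Chars.split₀.go]
    split
    · split
      · rw [ih [] acc, ih [] []]
      · rw [ih [] (cur.reverse :: acc), ih [] [cur.reverse]]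
        simp
    · rw [ih (c :: cur) acc, ih (c :: cur) []]

-- one step of split₀.go on a space / on a word character
theorem pv_go_space (l cur : List Char) :
    PySem.Chars.split₀.go (' ' :: l) cur []
    = (if cur.isEmpty then [] else [cur.reverse]) ++ PySem.Chars.split₀.go l [] [] := by
  simp only [PySem.Chars.split₀.go]
  rw [if_pos (show PySem.Chars.isspace ' ' = true by decide)]
  by_cases hc : cur.isEmpty = true
  · simp [hc]
  · rw [if_neg hc, pv_go_acc l [] [cur.reverse]]
    simp [hc]

theorem pv_go_word (l cur : List Char) (c : Char) (h : PySem.Chars.isspace c = false) :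
    PySem.Chars.split₀.go (c :: l) cur [] = PySem.Chars.split₀.go l (c :: cur) [] := by
  simp only [PySem.Chars.split₀.go, h]
  simp

-- B's fold-with-flush over cs equals split₀ of the space-normalized cs
theorem pv_foldl_go (cs : List Char) : ∀ (toks : List (List Char)) (cur : List Char), '’' ∉ cs →
    (let st := cs.foldl pvStepB (toks, cur); if st.2.isEmpty then st.1 else st.1 ++ [st.2])
    = toks ++ PySem.Chars.split₀.go
        (cs.map (fun c => if PySem.Chars.isalnum c || c == '_' || c == '\'' then c else ' '))
        cur.reverse [] := by
  induction cs with
  | nil =>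
    intro toks cur _
    simp only [List.foldl_nil, List.map_nil, PySem.Chars.split₀.go]
    by_cases hc : cur = []
    · subst hc; simp
    · simp [hc, List.isEmpty_iff]
  | cons c rest ih =>
    intro toks cur hq
    have hcq : ¬(c == '’') = true := by
      simp only [beq_iff_eq]
      exact fun hcc => hq (by simp [hcc])
    simp only [List.foldl_cons, List.map_cons]
    by_cases hw : (PySem.Chars.isalnum c || c == '_' || c == '\'') = true
    · have hstep : pvStepB (toks, cur) c = (toks, cur ++ [c]) := by
        simp [pvStepB, hcq, hw]
      rw [hstep, if_pos hw, pv_go_word _ _ _ (pv_word_not_space c hw)]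
      have h2 : c :: cur.reverse = (cur ++ [c]).reverse := by simp
      rw [h2]
      exact ih toks (cur ++ [c]) (fun h => hq (by simp [h]))
    · have hmap : (if PySem.Chars.isalnum c || c == '_' || c == '\'' then c else ' ') = ' ' :=
        if_neg hw
      rw [hmap, pv_go_space]
      by_cases hc : cur = []
      · subst hc
        have hstep : pvStepB (toks, []) c = (toks, []) := by
          simp [pvStepB, hcq, hw]
        rw [hstep]
        simpa using ih toks [] (fun h => hq (by simp [h]))
      · have hstep : pvStepB (toks, cur) c = (toks ++ [cur], []) := by
          simp [pvStepB, hcq, hw, List.isEmpty_iff, hc]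
        rw [hstep]
        have h3 := ih (toks ++ [cur]) [] (fun h => hq (by simp [h]))
        simp only at h3
        rw [h3]
        simp [List.isEmpty_iff, hc]

theorem pv_tok_eq (text : String) (hd : Dom_is_ungrounded_operational_narration_py text) :
    pvTokenizeB text = pvTokenizeA text := by
  have hq := pv_no_quote text hd
  unfold pvTokenizeB pvTokenizeA
  rw [pv_replace_eq _ hq]
  have := pv_foldl_go (PySem.Chars.lower text.toList) [] [] hq
  simp only at this
  rw [this]
  rfl

-- the n-gram scan finds seq exactly when seq is a contiguous run of toks
theorem pv_slice_exists (toks seq : List (List Char)) (hne : seq ≠ []) :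
    (∃ i ∈ PySem.List.pyRange 0 (PySem.List.len toks),
      PySem.List.slice toks (some i) (some (i + PySem.List.len seq)) = seq)
    ↔ seq <:+: toks := by
  constructor
  · rintro ⟨i, hi, hs⟩
    rw [PySem.List.mem_pyRange_one] at hi
    obtain ⟨j, rfl⟩ := Int.eq_ofNat_of_zero_le hi.1
    have hlen : (PySem.List.len seq : Int) = (seq.length : Int) := rfl
    rw [hlen, ← Int.natCast_add, PySem.List.slice_natCast] at hs
    simp only [Nat.add_sub_cancel_left] at hs
    have hpre : seq <+: List.drop j toks := hs ▸ List.take_prefix _ _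
    exact hpre.isInfix.trans (List.drop_suffix j toks).isInfix
  · rintro ⟨a, b, rfl⟩
    refine ⟨(a.length : Int), ?_, ?_⟩
    · rw [PySem.List.mem_pyRange_one]
      refine ⟨Int.natCast_nonneg _, ?_⟩
      have : PySem.List.len (a ++ seq ++ b) = ((a.length + seq.length + b.length : ℕ) : Int) := by
        simp [PySem.List.len]
        omega
      rw [this]
      have : 1 ≤ seq.length := Nat.one_le_iff_ne_zero.mpr (by simpa using hne)
      push_cast
      omega
    · have hlen : (PySem.List.len seq : Int) = (seq.length : Int) := rfl
      rw [hlen, ← Int.natCast_add, PySem.List.slice_natCast]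
      simp only [Nat.add_sub_cancel_left]
      rw [List.append_assoc, List.drop_left, List.take_left' rfl]

-- padded-substring search for one phrase = contiguous token run, over good tokens
theorem pv_phrase_iff (toks : List (List Char)) (hg : ∀ t ∈ toks, pvGoodW t)
    (p : List Char) (seq : List (List Char))
    (hps : ' ' :: p ++ [' '] = pvQ seq) (hseq : seq ≠ []) (hgs : ∀ w ∈ seq, pvGoodW w) :
    (PySem.Chars.isIn (' ' :: p ++ [' ']) (' ' :: PySem.Chars.join [' '] toks ++ [' ']) = true)
    ↔ seq <:+: toks := by
  cases toks with
  | nil =>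
    rw [PySem.Chars.isIn_iff_infix]
    constructor
    · intro h
      have hl := h.length_le
      cases seq with
      | nil => exact absurd rfl hseq
      | cons u us =>
        have h3 := pvQ_len3 u us (hgs u (by simp)).1
        rw [hps] at hl
        simp [PySem.Chars.join, List.intercalate] at hl
        omega
    · intro h
      have := h.length_le
      cases seq with
      | nil => exact absurd rfl hseq
      | cons u us => simp at this
  | cons t ts =>
    rw [PySem.Chars.isIn_iff_infix, pv_pad_eq (t :: ts) (by simp), hps]
    exact pv_q_infix_iff seq (t :: ts) hgs hg

-- membership-style characterization of List.any
theorem pv_any_iff {α : Type} (l : List α) (p : α → Bool) :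
    l.any p = true ↔ ∃ x ∈ l, p x = true := List.any_eq_true

set_option maxRecDepth 4000 in
theorem pv_main (text : String) (hd : Dom_is_ungrounded_operational_narration_py text) :
    is_ungrounded_operational_narration_py text = is_ungrounded_operational_narration_py_alt text := by
  have htok := pv_tok_eq text hd
  unfold is_ungrounded_operational_narration_py is_ungrounded_operational_narration_py_alt
  rw [htok]
  set toks := pvTokenizeA text with htoks
  have hgt : ∀ t ∈ toks, pvGoodW t := pv_split₀_good _
  -- A as a disjunction
  have hA : (if pvHasAnyPhraseA text pvPhrasesA then true
      else (PySem.List.enumerate toks).any (fun it =>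
        it.2 == "approve".toList &&
        (PySem.List.slice toks (some (it.1 + 1)) (some (it.1 + 5))).contains "tool".toList))
      = (pvHasAnyPhraseA text pvPhrasesA ||
        (PySem.List.enumerate toks).any (fun it =>
          it.2 == "approve".toList &&
          (PySem.List.slice toks (some (it.1 + 1)) (some (it.1 + 5))).contains "tool".toList)) := by
    by_cases h : pvHasAnyPhraseA text pvPhrasesA = true
    · simp [h]
    · simp [h]
  rw [hA]
  rw [Bool.eq_iff_iff]
  simp only [Bool.or_eq_true, pv_any_iff, Bool.and_eq_true, beq_iff_eq]
  constructor
  · rintro (hph | ⟨⟨i, t⟩, hmem, hap, htool⟩)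
    · -- phrase found by A: find the matching token run and its index
      simp only [pvHasAnyPhraseA, pv_any_iff] at hph
      obtain ⟨p, hp, hpi⟩ := hph
      unfold pvNormalizedLowerA at hpi
      rw [← htoks] at hpi
      have key : ∃ seq ∈ pvSeqsB, seq <:+: toks := by
        unfold pvPhrasesA at hp
        simp only [List.mem_cons, List.not_mem_nil, or_false] at hp
        rcases hp with rfl | rfl | rfl | rfl | rfl | rfl | rfl
        · exact ⟨["i".toList, "need".toList, "permission".toList], by simp [pvSeqsB], (pv_phrase_iff toks hgt ("i need permission".toList) ["i".toList, "need".toList, "permission".toList] (by decide) (by decide) (by simp [pvGoodW])).mp hpi⟩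
        · exact ⟨["resend".toList, "the".toList, "message".toList], by simp [pvSeqsB], (pv_phrase_iff toks hgt ("resend the message".toList) ["resend".toList, "the".toList, "message".toList] (by decide) (by decide) (by simp [pvGoodW])).mp hpi⟩
        · exact ⟨["try".toList, "again".toList], by simp [pvSeqsB], (pv_phrase_iff toks hgt ("try again".toList) ["try".toList, "again".toList] (by decide) (by decide) (by simp [pvGoodW])).mp hpi⟩
        · exact ⟨["fetch".toList, "web".toList, "content".toList, "first".toList], by simp [pvSeqsB], (pv_phrase_iff toks hgt ("fetch web content first".toList) ["fetch".toList, "web".toList, "content".toList, "first".toList] (by decide) (by decide) (by simp [pvGoodW])).mp hpi⟩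
        · exact ⟨["runtime".toList, "state".toList], by simp [pvSeqsB], (pv_phrase_iff toks hgt ("runtime state".toList) ["runtime".toList, "state".toList] (by decide) (by decide) (by simp [pvGoodW])).mp hpi⟩
        · exact ⟨["permission".toList, "to".toList, "fetch".toList], by simp [pvSeqsB], (pv_phrase_iff toks hgt ("permission to fetch".toList) ["permission".toList, "to".toList, "fetch".toList] (by decide) (by decide) (by simp [pvGoodW])).mp hpi⟩
        · exact ⟨["webfetch".toList], by simp [pvSeqsB], (pv_phrase_iff toks hgt ("webfetch".toList) ["webfetch".toList] (by decide) (by decide) (by simp [pvGoodW])).mp hpi⟩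
      obtain ⟨seq, hseqmem, hinf⟩ := key
      have hne : seq ≠ [] := by
        unfold pvSeqsB at hseqmem
        simp only [List.mem_cons, List.not_mem_nil, or_false] at hseqmem
        rcases hseqmem with rfl | rfl | rfl | rfl | rfl | rfl | rfl <;> simp
      obtain ⟨i, hi, hs⟩ := (pv_slice_exists toks seq hne).mpr hinf
      exact ⟨i, hi, Or.inl ⟨seq, hseqmem, hs⟩⟩
    · -- approve/tool found by A: same index on B's range scan
      rw [PySem.List.enumerate_eq_map_pyRange toks ([] : List Char), List.mem_map] at hmem
      obtain ⟨j, hj, hji⟩ := hmem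
      obtain ⟨rfl, rfl⟩ : j = i ∧ PySem.List.pyGetD toks j [] = t := by
        constructor
        · exact congrArg Prod.fst hji
        · exact congrArg Prod.snd hji
      refine ⟨j, by simpa [PySem.List.len] using hj, Or.inr ⟨hap, htool⟩⟩
  · rintro ⟨i, hi, hcase⟩
    rcases hcase with hph | ⟨hap, htool⟩
    · -- phrase found by B at index i
      obtain ⟨seq, hseqmem, hs⟩ := hph
      have hne : seq ≠ [] := by
        unfold pvSeqsB at hseqmem
        simp only [List.mem_cons, List.not_mem_nil, or_false] at hseqmem
        rcases hseqmem with rfl | rfl | rfl | rfl | rfl | rfl | rfl <;> simp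
      have hinf : seq <:+: toks := (pv_slice_exists toks seq hne).mp ⟨i, hi, hs⟩
      left
      simp only [pvHasAnyPhraseA, pv_any_iff, pvNormalizedLowerA]
      rw [← htoks]
      unfold pvSeqsB at hseqmem
      simp only [List.mem_cons, List.not_mem_nil, or_false] at hseqmem
      unfold pvPhrasesA
      rcases hseqmem with rfl | rfl | rfl | rfl | rfl | rfl | rfl
      · exact ⟨"i need permission", by simp, (pv_phrase_iff toks hgt ("i need permission".toList) ["i".toList, "need".toList, "permission".toList] (by decide) (by decide) (by simp [pvGoodW])).mpr hinf⟩
      · exact ⟨"resend the message", by simp, (pv_phrase_iff toks hgt ("resend the message".toList) ["resend".toList, "the".toList, "message".toList] (by decide) (by decide) (by simp [pvGoodW])).mpr hinf⟩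
      · exact ⟨"try again", by simp, (pv_phrase_iff toks hgt ("try again".toList) ["try".toList, "again".toList] (by decide) (by decide) (by simp [pvGoodW])).mpr hinf⟩
      · exact ⟨"fetch web content first", by simp, (pv_phrase_iff toks hgt ("fetch web content first".toList) ["fetch".toList, "web".toList, "content".toList, "first".toList] (by decide) (by decide) (by simp [pvGoodW])).mpr hinf⟩
      · exact ⟨"runtime state", by simp, (pv_phrase_iff toks hgt ("runtime state".toList) ["runtime".toList, "state".toList] (by decide) (by decide) (by simp [pvGoodW])).mpr hinf⟩
      · exact ⟨"permission to fetch", by simp, (pv_phrase_iff toks hgt ("permission to fetch".toList) ["permission".toList, "to".toList, "fetch".toList] (by decide) (by decide) (by simp [pvGoodW])).mpr hinf⟩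
      · exact ⟨"webfetch", by simp, (pv_phrase_iff toks hgt ("webfetch".toList) ["webfetch".toList] (by decide) (by decide) (by simp [pvGoodW])).mpr hinf⟩
    · -- approve/tool found by B at index i
      right
      refine ⟨(i, PySem.List.pyGetD toks i []), ?_, hap, htool⟩
      rw [PySem.List.enumerate_eq_map_pyRange toks ([] : List Char), List.mem_map]
      exact ⟨i, by simpa [PySem.List.len] using hi, rfl⟩

-- ===== VERDICT (by name: the statement is the Claim_ definition above) =====
theorem is_ungrounded_operational_narration_py_spec : Claim_equal_is_ungrounded_operational_narration_py := by
  intro text hd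
  unfold Spec_is_ungrounded_operational_narration_py
  exact pv_main text hd
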